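-- pv_equiv track=rewrite | github.com/aiedwardyi/aiedwardyi | scripts/profile_data.py | compute_current_streak
-- ===== SOURCE A (Python) =====
-- from typing import Iterable
--
-- def compute_current_streak(days: Iterable[dict]) -> int:
--     """Count consecutive days with count >= 1, walking backward from the last day.
--
--     Caller must pre-filter out future-dated days. GitHub's contribution calendar
--     returns whole Sun-Sat weeks, padding future days with count=0 - those would
--     otherwise break the streak immediately on any non-Saturday.
--
--     Args:
--         days: Sequence of {'date': str, 'count': int} dicts, oldest first,
--             containing only dates up to and including today.
--
--     Returns:
--         Integer streak length. Zero if today (the last day) has no contributions.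
--     """
--     streak = 0
--     for day in reversed(list(days)):
--         if day["count"] >= 1:
--             streak += 1
--         else:
--             break
--     return streak
-- ===== SOURCE B (Python) =====
-- from typing import Iterable
--
-- def compute_current_streak(days: Iterable[dict]) -> int:
--     """Forward single pass: running counter, reset to 0 on a day with count < 1.
--
--     Only the final trailing run of count>=1 days survives the resets, so the
--     counter after the loop equals the backward streak length.
--     """
--     streak = 0
--     for day in days:
--         if day["count"] >= 1:
--             streak += 1
--         else:
--             streak = 0
--     return streak
-- ===== Notes on version B (the rewrite author's own statement) =====
-- stated objective: alternative
-- what changed: B replaces A's materialize-and-reverse backward walk with early break by a single forward pass over the iterable with a reset-to-zero accumulator, never building or reversing a list.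
-- outside the precondition, e.g. on compute_current_streak([{}, {'count': 0}]): A returns 0, B raises KeyError
import Mathlib
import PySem

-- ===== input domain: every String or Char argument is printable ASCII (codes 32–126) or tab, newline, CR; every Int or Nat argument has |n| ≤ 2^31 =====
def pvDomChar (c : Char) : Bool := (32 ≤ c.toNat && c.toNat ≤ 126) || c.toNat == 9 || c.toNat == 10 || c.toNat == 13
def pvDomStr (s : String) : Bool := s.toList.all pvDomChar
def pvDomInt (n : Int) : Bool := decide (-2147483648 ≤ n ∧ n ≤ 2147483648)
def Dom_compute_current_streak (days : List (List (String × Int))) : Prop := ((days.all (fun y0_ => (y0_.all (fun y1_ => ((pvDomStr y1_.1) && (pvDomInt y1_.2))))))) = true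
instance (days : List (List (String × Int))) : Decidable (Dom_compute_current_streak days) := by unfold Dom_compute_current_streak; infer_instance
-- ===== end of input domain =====

-- B replaces A's reversed walk with early break by one forward pass with a reset-to-zero accumulator (alternative decomposition, same cost).


-- ===== PORT A =====
-- day["count"]: first-match association-list lookup; inside Pre_ the key is present, so getD 0 is exact.
def pvGetCount (d : List (String × Int)) : Int := ((PySem.Dict.mk d).get? "count").getD 0

-- the 'for day in reversed(list(days)): … else: break' loop, carrying the streak accumulator
def pvStreakGo : List (List (String × Int)) → Int → Int
  | [], s => s
  | d :: rest, s => if pvGetCount d ≥ 1 then pvStreakGo rest (s + 1) else s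

def compute_current_streak (days : List (List (String × Int))) : Int :=
  pvStreakGo days.reverse 0

-- ===== PORT B =====
def compute_current_streak_alt (days : List (List (String × Int))) : Int :=
  days.foldl (fun s d => if pvGetCount d ≥ 1 then s + 1 else 0) 0

-- ===== PRECONDITION & SPEC =====
-- Pre_ excludes inputs where some day lacks a "count" key: B (and A, once it reaches such
-- a day) raises KeyError there; on a few such inputs A still returns because it breaks first.
def Pre_compute_current_streak (days : List (List (String × Int))) : Prop :=
  (days.all (fun d => d.any (fun p => p.1 == "count"))) = true
instance (days : List (List (String × Int))) : Decidable (Pre_compute_current_streak days) := by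
  unfold Pre_compute_current_streak; infer_instance

def pvWitness_compute_current_streak : (List (List (String × Int))) :=
  [[("count", 1)], [("count", 0)], [("count", 2)]]

def Spec_compute_current_streak (days : List (List (String × Int))) (out : Int) : Prop := out = compute_current_streak_alt days
instance (days : List (List (String × Int))) (out : Int) : Decidable (Spec_compute_current_streak days out) := by unfold Spec_compute_current_streak; infer_instance

-- ===== CLAIM (what is proved, stated in full; the proofs are below) =====
def Claim_equal_compute_current_streak : Prop := ∀ (days : List (List (String × Int))), Dom_compute_current_streak days → Pre_compute_current_streak days → Spec_compute_current_streak days (compute_current_streak days)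

-- ===== LEMMAS AND PROOFS =====
theorem pvStreakGo_acc (l : List (List (String × Int))) (s : Int) :
    pvStreakGo l s = s + pvStreakGo l 0 := by
  induction l generalizing s with
  | nil => simp [pvStreakGo]
  | cons d rest ih =>
    simp only [pvStreakGo]
    split
    · rw [ih (s + 1), ih (0 + 1)]; ring
    · simp

theorem pv_main (days : List (List (String × Int))) :
    compute_current_streak days = compute_current_streak_alt days := by
  unfold compute_current_streak compute_current_streak_alt
  induction days using List.reverseRecOn with
  | nil => rfl
  | append_singleton xs x ih =>
    rw [List.reverse_append, List.foldl_append]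
    simp only [List.reverse_cons, List.reverse_nil, List.nil_append, List.singleton_append,
      List.foldl_cons, List.foldl_nil, pvStreakGo]
    split
    · rw [pvStreakGo_acc, ih]; ring
    · rfl

-- ===== VERDICT (by name: the statement is the Claim_ definition above) =====
theorem compute_current_streak_spec : Claim_equal_compute_current_streak := by
  intro days _ _
  unfold Spec_compute_current_streak
  exact pv_main days
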